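-- pv_equiv track=rewrite | github.com/Artim436/pathcond | src/plot.py | _compute_lambda_boundaries
-- ===== SOURCE A (Python) =====
-- def _compute_lambda_boundaries(layer_sizes, nb_iter_optim):
--     """
--     Renvoie la liste des index (dans lambdas_history) où se terminent
--     chaque (layer, pass). Utile pour vlines.
--     Exemple: layer_sizes=[5,3], nb_iter_optim=2 -> frontières: [5, 8, 13, 16]
--     (on exclut la toute fin si tu veux éviter une vline terminale).
--     """
--     boundaries = []
--     acc = 0
--     for _ in range(nb_iter_optim):
--         for s in layer_sizes:
--             acc += s
--             boundaries.append(acc)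
--     return boundaries
-- ===== SOURCE B (Python) =====
-- def _compute_lambda_boundaries(layer_sizes, nb_iter_optim):
--     # Precompute within-pass prefix sums once; each pass p just adds the offset p*total.
--     prefix = []
--     acc = 0
--     for s in layer_sizes:
--         acc += s
--         prefix.append(acc)
--     total = sum(layer_sizes)
--     out = []
--     for p in range(nb_iter_optim):
--         out.extend(p * total + pre for pre in prefix)
--     return out
-- ===== Notes on version B (the rewrite author's own statement) =====
-- stated objective: alternative
-- what changed: Replaces the single running accumulator threaded through all nb_iter_optim*len(layer_sizes) additions by a per-pass decomposition: the within-pass prefix sums are computed once and each pass p emits p*total + prefix[j].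
import Mathlib
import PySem

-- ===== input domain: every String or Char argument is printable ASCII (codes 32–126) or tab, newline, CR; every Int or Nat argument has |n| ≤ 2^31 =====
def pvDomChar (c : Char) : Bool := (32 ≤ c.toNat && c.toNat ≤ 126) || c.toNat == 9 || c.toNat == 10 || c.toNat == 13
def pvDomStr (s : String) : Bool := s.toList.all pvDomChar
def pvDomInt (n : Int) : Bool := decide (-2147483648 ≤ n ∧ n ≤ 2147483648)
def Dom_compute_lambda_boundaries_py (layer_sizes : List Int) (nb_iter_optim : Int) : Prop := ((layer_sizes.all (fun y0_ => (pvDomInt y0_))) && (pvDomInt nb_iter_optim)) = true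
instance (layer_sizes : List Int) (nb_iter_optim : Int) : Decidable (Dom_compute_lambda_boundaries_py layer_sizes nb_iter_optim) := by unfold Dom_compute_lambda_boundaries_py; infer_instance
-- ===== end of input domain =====

-- B precomputes the within-pass prefix sums once and offsets each pass by p*total,
-- instead of threading one running accumulator through every addition (alternative decomposition).


-- ===== PORT A =====
-- for _ in range(nb_iter_optim): for s in layer_sizes: acc += s; boundaries.append(acc)
def compute_lambda_boundaries_py (layer_sizes : List Int) (nb_iter_optim : Int) : List Int :=
  ((PySem.List.pyRange 0 nb_iter_optim 1).foldl
    (fun (st : List Int × Int) _ =>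
      layer_sizes.foldl (fun (st : List Int × Int) s => (st.1 ++ [st.2 + s], st.2 + s)) st)
    ([], 0)).1

-- ===== PORT B =====
-- prefix sums of layer_sizes (the acc/append loop of Source B)
def pvPrefixSums : List Int → Int → List Int
  | [], _ => []
  | s :: rest, acc => (acc + s) :: pvPrefixSums rest (acc + s)

def compute_lambda_boundaries_py_alt (layer_sizes : List Int) (nb_iter_optim : Int) : List Int :=
  let pre_ := pvPrefixSums layer_sizes 0
  let total := layer_sizes.sum
  (PySem.List.pyRange 0 nb_iter_optim 1).foldl
    (fun out p => out ++ pre_.map (fun pre => p * total + pre)) []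

-- ===== PRECONDITION & SPEC =====
def Spec_compute_lambda_boundaries_py (layer_sizes : List Int) (nb_iter_optim : Int) (out : List Int) : Prop := out = compute_lambda_boundaries_py_alt layer_sizes nb_iter_optim
instance (layer_sizes : List Int) (nb_iter_optim : Int) (out : List Int) : Decidable (Spec_compute_lambda_boundaries_py layer_sizes nb_iter_optim out) := by unfold Spec_compute_lambda_boundaries_py; infer_instance

-- ===== CLAIM (what is proved, stated in full; the proofs are below) =====
def Claim_equal_compute_lambda_boundaries_py : Prop := ∀ (layer_sizes : List Int) (nb_iter_optim : Int), Dom_compute_lambda_boundaries_py layer_sizes nb_iter_optim → Spec_compute_lambda_boundaries_py layer_sizes nb_iter_optim (compute_lambda_boundaries_py layer_sizes nb_iter_optim)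

-- ===== LEMMAS AND PROOFS =====

-- shifting the accumulator shifts every prefix sum
theorem pvPrefixSums_shift (ls : List Int) (a b : Int) :
    pvPrefixSums ls (a + b) = (pvPrefixSums ls b).map (fun x => a + x) := by
  induction ls generalizing b with
  | nil => simp [pvPrefixSums]
  | cons s rest ih =>
      simp only [pvPrefixSums, List.map_cons, List.cons.injEq]
      exact ⟨by ring, by rw [show a + b + s = a + (b + s) by ring, ih]⟩

-- one pass of A's inner loop appends the prefix sums from acc and adds the pass total
theorem pvInner (ls : List Int) (b : List Int) (acc : Int) :
    ls.foldl (fun (st : List Int × Int) s => (st.1 ++ [st.2 + s], st.2 + s)) (b, acc)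
      = (b ++ pvPrefixSums ls acc, acc + ls.sum) := by
  induction ls generalizing b acc with
  | nil => simp [pvPrefixSums]
  | cons s rest ih =>
      simp only [List.foldl_cons, pvPrefixSums, List.sum_cons]
      rw [ih]
      simp only [Prod.mk.injEq]
      exact ⟨by simp, by ring⟩

-- after k full passes A's state is (B's output over k passes, k * total)
theorem pvOuter (ls : List Int) (k : Nat) :
    (PySem.List.pyRange 0 (k : Int) 1).foldl
        (fun (st : List Int × Int) _ =>
          ls.foldl (fun (st : List Int × Int) s => (st.1 ++ [st.2 + s], st.2 + s)) st)
        ([], 0)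
      = ((PySem.List.pyRange 0 (k : Int) 1).foldl
          (fun out p => out ++ (pvPrefixSums ls 0).map (fun pre => p * ls.sum + pre)) [],
         (k : Int) * ls.sum) := by
  induction k with
  | zero => simp [pysem]
  | succ k ih =>
      rw [show ((k + 1 : Nat) : Int) = (k : Int) + 1 by push_cast; ring,
          PySem.List.pyRange_one_succ_right (by positivity)]
      simp only [List.foldl_append, List.foldl_cons, List.foldl_nil]
      rw [ih, pvInner]
      simp only [Prod.mk.injEq]
      refine ⟨?_, by ring⟩
      congr 1
      rw [show (k : Int) * ls.sum = (k : Int) * ls.sum + 0 by ring, pvPrefixSums_shift]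
      simp

-- ===== VERDICT (by name: the statement is the Claim_ definition above) =====
theorem compute_lambda_boundaries_py_spec : Claim_equal_compute_lambda_boundaries_py := by
  intro ls n _
  unfold Spec_compute_lambda_boundaries_py compute_lambda_boundaries_py compute_lambda_boundaries_py_alt
  by_cases hn : 0 ≤ n
  · obtain ⟨k, rfl⟩ := Int.eq_ofNat_of_zero_le hn
    rw [pvOuter]
  · rw [show PySem.List.pyRange 0 n 1 = [] by
        simp [PySem.List.pyRange_one]; omega]
    simp
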